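-- pv_equiv track=rewrite | github.com/YuWang711/CSE151-DT-w-Prune | PA2.py | SplitDataByColumn
-- ===== SOURCE A (Python) =====
-- def SplitDataByColumn(data_set,feature_size):
--     data_array = []
--     for i in range(feature_size):
--         data_array.append([])
--     for i in range(len(data_set)):
--         for y in range(feature_size):
--             data_array[y].append([data_set[i][y], data_set[i][feature_size]])
--     return data_array
-- ===== SOURCE B (Python) =====
-- def SplitDataByColumn(data_set, feature_size):
--     # Column-table-first: transpose once, then pair each feature column with the label column.
--     if not data_set:
--         return [[] for _ in range(feature_size)]
--     cols = list(zip(*data_set))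
--     return [[[v, l] for v, l in zip(cols[y], cols[feature_size])]
--             for y in range(feature_size)]
-- ===== Notes on version B (the rewrite author's own statement) =====
-- stated objective: alternative
-- what changed: B transposes the data set once with zip(*data_set) and builds each output column by zipping a feature column with the label column, instead of A's row-major pass that interleaves appends into feature_size accumulators.
import Mathlib
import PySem

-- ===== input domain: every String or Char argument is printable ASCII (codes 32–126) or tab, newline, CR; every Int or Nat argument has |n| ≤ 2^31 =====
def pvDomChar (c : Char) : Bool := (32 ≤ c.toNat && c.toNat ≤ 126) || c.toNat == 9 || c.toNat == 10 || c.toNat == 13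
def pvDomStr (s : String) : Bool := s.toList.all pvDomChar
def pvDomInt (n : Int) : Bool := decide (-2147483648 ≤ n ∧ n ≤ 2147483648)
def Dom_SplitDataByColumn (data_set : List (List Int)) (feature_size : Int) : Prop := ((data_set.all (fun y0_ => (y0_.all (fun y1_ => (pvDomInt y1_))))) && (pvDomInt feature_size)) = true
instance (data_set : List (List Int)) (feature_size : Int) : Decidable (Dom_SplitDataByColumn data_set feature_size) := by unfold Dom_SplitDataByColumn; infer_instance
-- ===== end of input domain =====

-- B builds the result column-table-first (transpose once, then zip each feature column with the
-- label column) instead of A's row-major pass interleaving appends into feature_size accumulators.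


-- ===== PORT A =====
def SplitDataByColumn (data_set : List (List Int)) (feature_size : Int) : List (List (List Int)) :=
  -- data_array = []; for i in range(feature_size): data_array.append([])
  let data_array : List (List (List Int)) :=
    (PySem.List.pyRange 0 feature_size 1).foldl (fun a _ => a ++ [([] : List (List Int))]) []
  -- for i in range(len(data_set)): for y in range(feature_size): data_array[y].append(...)
  (PySem.List.pyRange 0 (data_set.length : Int) 1).foldl
    (fun arr i =>
      (PySem.List.pyRange 0 feature_size 1).foldl
        (fun arr y =>
          -- y comes from range(feature_size) so 0 ≤ y; toNat is exact here
          arr.modify y.toNat (fun col =>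
            col ++ [[PySem.List.pyGetD (PySem.List.pyGetD data_set i []) y 0,
                     PySem.List.pyGetD (PySem.List.pyGetD data_set i []) feature_size 0]]))
        arr)
    data_array

-- ===== PORT B =====
-- length that zip(*rows) truncates to: the minimum row length (rows nonempty where used)
def pvMinLen (rows : List (List Int)) : Nat :=
  match rows with
  | [] => 0
  | r :: rs => rs.foldl (fun m x => min m x.length) r.length

-- list(zip(*rows)): column j (j < every row length after truncation) of the row table
def pvTranspose (rows : List (List Int)) : List (List Int) :=
  (List.range (pvMinLen rows)).map (fun j => rows.map (fun r => r.getD j 0))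

def SplitDataByColumn_alt (data_set : List (List Int)) (feature_size : Int) : List (List (List Int)) :=
  if data_set = [] then
    (PySem.List.pyRange 0 feature_size 1).map (fun _ => ([] : List (List Int)))
  else
    let cols := pvTranspose data_set
    (PySem.List.pyRange 0 feature_size 1).map (fun y =>
      (List.zip (PySem.List.pyGetD cols y []) (PySem.List.pyGetD cols feature_size []))
        |>.map (fun p => [p.1, p.2]))

-- ===== PRECONDITION & SPEC =====
-- Pre_ excludes exactly the inputs where A raises IndexError: a positive feature_size with some
-- row shorter than feature_size+1 (for feature_size ≤ 0 both loops are empty and A returns []).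
def Pre_SplitDataByColumn (data_set : List (List Int)) (feature_size : Int) : Prop :=
  feature_size ≤ 0 ∨ ∀ row ∈ data_set, feature_size < (row.length : Int)
instance (data_set : List (List Int)) (feature_size : Int) : Decidable (Pre_SplitDataByColumn data_set feature_size) := by unfold Pre_SplitDataByColumn; infer_instance
def pvWitness_SplitDataByColumn : List (List Int) × Int := ([[1, 2], [3, 4]], 1)

def Spec_SplitDataByColumn (data_set : List (List Int)) (feature_size : Int) (out : List (List (List Int))) : Prop := out = SplitDataByColumn_alt data_set feature_size
instance (data_set : List (List Int)) (feature_size : Int) (out : List (List (List Int))) : Decidable (Spec_SplitDataByColumn data_set feature_size out) := by unfold Spec_SplitDataByColumn; infer_instance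

-- ===== CLAIM (what is proved, stated in full; the proofs are below) =====
def Claim_equal_SplitDataByColumn : Prop := ∀ (data_set : List (List Int)) (feature_size : Int), Dom_SplitDataByColumn data_set feature_size → Pre_SplitDataByColumn data_set feature_size → Spec_SplitDataByColumn data_set feature_size (SplitDataByColumn data_set feature_size)


-- ===== LEMMAS AND PROOFS =====

theorem pv_range_succ (n : Nat) : List.range (n + 1) = 0 :: (List.range n).map (· + 1) := by
  simpa [Nat.succ_eq_add_one] using (List.range_succ_eq_map (n := n))

-- folding a function that ignores its index is the identity
theorem pv_foldl_id {α β : Type} (l : List β) (acc : α) :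
    l.foldl (fun a _ => a) acc = acc := by
  induction l generalizing acc with
  | nil => rfl
  | cons x xs ih => simp [List.foldl_cons, ih]

-- building the empty accumulators by repeated append is a constant map
theorem pv_foldl_append_const {α β : Type} (l : List β) (c : α) :
    ∀ acc : List α, l.foldl (fun a _ => a ++ [c]) acc = acc ++ l.map (fun _ => c) := by
  induction l with
  | nil => intro acc; simp
  | cons x xs ih => intro acc; simp [List.foldl_cons, ih]

-- fold over successor indices never touches the head
theorem pv_foldl_modify_succ {α : Type} (l : List Nat) (f : Nat → α → α) :
    ∀ (h : α) (t : List α),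
      l.foldl (fun a y => a.modify (y + 1) (f y)) (h :: t)
        = h :: l.foldl (fun a y => a.modify y (f y)) t := by
  induction l with
  | nil => intro h t; simp
  | cons x xs ih => intro h t; simp [List.foldl_cons, List.modify_succ_cons, ih]

-- the inner Python loop appends one entry to every accumulator
theorem pv_foldl_modify_range {α : Type} :
    ∀ (arr : List (List α)) (e : Nat → α),
      (List.range arr.length).foldl (fun a y => a.modify y (fun c => c ++ [e y])) arr
        = arr.mapIdx (fun y c => c ++ [e y]) := by
  intro arr
  induction arr with
  | nil => intro e; simp
  | cons c cs ih =>
    intro e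
    rw [List.length_cons, pv_range_succ, List.foldl_cons, List.modify_zero_cons,
      List.foldl_map, pv_foldl_modify_succ (f := fun y col => col ++ [e (y + 1)]),
      ih (fun y => e (y + 1)), List.mapIdx_cons]

-- the outer Python loop: each accumulator collects one entry per row
theorem pv_outer_fold {n : Nat} (E : List Int → Nat → List Int) :
    ∀ (rows : List (List Int)) (arr : List (List (List Int))), arr.length = n →
      rows.foldl
        (fun a row =>
          (List.range n).foldl (fun a' y => a'.modify y (fun c => c ++ [E row y])) a)
        arr
      = arr.mapIdx (fun y c => c ++ rows.map (fun row => E row y)) := by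
  intro rows
  induction rows with
  | nil =>
    intro arr _
    simp only [List.foldl_nil, List.map_nil, List.append_nil]
    apply List.ext_getElem <;> simp
  | cons r rs ih =>
    intro arr hlen
    subst hlen
    rw [List.foldl_cons, pv_foldl_modify_range arr (fun y => E r y),
      ih _ (by simp), List.mapIdx_mapIdx]
    simp only [Function.comp_def, List.append_assoc, List.singleton_append, List.map_cons]

-- mapIdx over a range-map collapses to a single map
theorem pv_mapIdx_map_range {α : Type} (n : Nat) (f : Nat → α) (g : Nat → α → α) :
    ((List.range n).map f).mapIdx g = (List.range n).map (fun y => g y (f y)) := by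
  apply List.ext_getElem <;> simp

-- ((range m).map f).getD k d = f k for k < m
theorem pv_getD_map_range {α : Type} (m k : Nat) (f : Nat → α) (d : α) (h : k < m) :
    ((List.range m).map f).getD k d = f k := by
  rw [List.getD_eq_getElem _ _ (by simpa using h)]
  simp

theorem pv_minLen_lt (n : Nat) :
    ∀ (rows : List (List Int)), rows ≠ [] → (∀ row ∈ rows, n < row.length) →
      n < pvMinLen rows := by
  have aux : ∀ (rs : List (List Int)) (m : Nat), n < m → (∀ x ∈ rs, n < x.length) →
      n < rs.foldl (fun m x => min m x.length) m := by
    intro rs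
    induction rs with
    | nil => intro m hm _; simpa using hm
    | cons x xs ih =>
      intro m hm hall
      rw [List.foldl_cons]
      exact ih _ (lt_min hm (hall x (by simp))) (fun z hz => hall z (by simp [hz]))
  intro rows hne hall
  match rows with
  | [] => exact absurd rfl hne
  | r :: rs => exact aux rs r.length (hall r (by simp)) (fun z hz => hall z (by simp [hz]))

-- ===== VERDICT (by name: the statement is the Claim_ definition above) =====
theorem SplitDataByColumn_spec : Claim_equal_SplitDataByColumn := by
  intro ds fs _dom hpre
  show SplitDataByColumn ds fs = SplitDataByColumn_alt ds fs
  by_cases hfs : fs ≤ 0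
  · -- both loops over range(feature_size) are empty: both sides are []
    have hr : PySem.List.pyRange 0 fs 1 = [] := PySem.List.pyRange_one_eq_nil (by omega)
    simp only [SplitDataByColumn, SplitDataByColumn_alt, hr, List.foldl_nil, List.map_nil]
    rw [pv_foldl_id]
    split <;> rfl
  · rw [not_le] at hfs
    have hall : ∀ row ∈ ds, fs < (row.length : Int) := by
      rcases hpre with h | h
      · omega
      · exact h
    set n := fs.toNat with hn
    have hfsn : fs = (n : Int) := by omega
    have hpyr : PySem.List.pyRange 0 fs 1 = (List.range n).map (fun k : Nat => (k : Int)) := by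
      rw [PySem.List.pyRange_one, show (fs - 0).toNat = n by omega]
      exact List.map_congr_left (fun k _ => by omega)
    rcases eq_or_ne ds [] with hds | hds
    · subst hds
      simp only [SplitDataByColumn, SplitDataByColumn_alt]
      rw [show ((List.length ([] : List (List Int)) : Int)) = (0 : Int) by simp,
        PySem.List.pyRange_one_eq_nil le_rfl, List.foldl_nil,
        pv_foldl_append_const]
      simp
    · have halln : ∀ row ∈ ds, n < row.length := by
        intro row hrow; have := hall row hrow; omega
      have hml : n < pvMinLen ds := pv_minLen_lt n ds hds halln
      -- A side
      have hA : SplitDataByColumn ds fs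
          = (List.range n).map (fun y => ds.map (fun row => [row.getD y 0, row.getD n 0])) := by
        have key : SplitDataByColumn ds fs
            = ds.foldl
                (fun arr row => (PySem.List.pyRange 0 fs 1).foldl
                  (fun a y => a.modify y.toNat (fun col =>
                    col ++ [[PySem.List.pyGetD row y 0, PySem.List.pyGetD row fs 0]])) arr)
                ((PySem.List.pyRange 0 fs 1).foldl
                  (fun a _ => a ++ [([] : List (List Int))]) []) :=
          PySem.List.foldl_pyRange_zero_pyGetD' ds ([] : List Int)
            (fun (arr : List (List (List Int))) (row : List Int) => (PySem.List.pyRange 0 fs 1).foldl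
              (fun a y => a.modify y.toNat (fun col =>
                col ++ [[PySem.List.pyGetD row y 0, PySem.List.pyGetD row fs 0]])) arr)
            _
        have hbody : (fun (arr : List (List (List Int))) (row : List Int) =>
              (PySem.List.pyRange 0 fs 1).foldl
                (fun a y => a.modify y.toNat (fun col =>
                  col ++ [[PySem.List.pyGetD row y 0, PySem.List.pyGetD row fs 0]])) arr)
            = (fun arr row =>
              (List.range n).foldl
                (fun a k => a.modify k (fun col =>
                  col ++ [[row.getD k 0, row.getD n 0]])) arr) := by
          funext arr row
          rw [hpyr, List.foldl_map]
          simp [PySem.List.pyGetD_natCast, hfsn]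
        rw [key, hbody, pv_foldl_append_const, List.nil_append, hpyr, List.map_map,
          pv_outer_fold (fun row y => [row.getD y 0, row.getD n 0]) ds _ (by simp),
          pv_mapIdx_map_range]
        simp
      -- B side
      have hB : SplitDataByColumn_alt ds fs
          = (List.range n).map (fun y => ds.map (fun row => [row.getD y 0, row.getD n 0])) := by
        simp only [SplitDataByColumn_alt, if_neg hds]
        rw [hpyr, List.map_map]
        apply List.map_congr_left
        intro k hk
        rw [List.mem_range] at hk
        simp only [Function.comp]
        rw [PySem.List.pyGetD_natCast, hfsn, PySem.List.pyGetD_natCast]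
        simp only [pvTranspose]
        rw [pv_getD_map_range _ _ _ _ (lt_trans hk hml), pv_getD_map_range _ _ _ _ hml,
          List.zip_map', List.map_map]
        rfl
      rw [hA, hB]
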